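-- pv_equiv track=rewrite | github.com/DevbyNaveen/flov7-backend | workflow-service/app/crewai/workflow_orchestrator.py | _determine_phase_type
-- ===== SOURCE A (Python) =====
-- from typing import Dict, Any, List, Optional
--
-- def _determine_phase_type(nodes: List[Dict[str, Any]]) -> str:
--     """Determine the type of execution phase"""
--     node_types = [node.get("type", "unknown") for node in nodes]
--
--     if any(nt in ["api_call", "webhook"] for nt in node_types):
--         return "external_integration"
--     elif any(nt in ["data_processor", "transform"] for nt in node_types):
--         return "data_processing"
--     elif any(nt in ["condition", "validation"] for nt in node_types):
--         return "validation"
--     else: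
--         return "general_processing"
-- ===== SOURCE B (Python) =====
-- _RANK = {
--     "api_call": 0, "webhook": 0,
--     "data_processor": 1, "transform": 1,
--     "condition": 2, "validation": 2,
-- }
--
-- _CATEGORY = ["external_integration", "data_processing", "validation", "general_processing"]
--
--
-- def _determine_phase_type(nodes):
--     """Determine the type of execution phase"""
--     best = 3
--     for node in nodes:
--         best = min(best, _RANK.get(node.get("type", "unknown"), 3))
--     return _CATEGORY[best]
-- ===== Notes on version B (the rewrite author's own statement) =====
-- stated objective: alternative
-- what changed: Replaces the three separate any(...) membership scans over the list of node types with a single pass that keeps the minimum priority rank from a type->rank dict and maps the final rank back to its category.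
import Mathlib
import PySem

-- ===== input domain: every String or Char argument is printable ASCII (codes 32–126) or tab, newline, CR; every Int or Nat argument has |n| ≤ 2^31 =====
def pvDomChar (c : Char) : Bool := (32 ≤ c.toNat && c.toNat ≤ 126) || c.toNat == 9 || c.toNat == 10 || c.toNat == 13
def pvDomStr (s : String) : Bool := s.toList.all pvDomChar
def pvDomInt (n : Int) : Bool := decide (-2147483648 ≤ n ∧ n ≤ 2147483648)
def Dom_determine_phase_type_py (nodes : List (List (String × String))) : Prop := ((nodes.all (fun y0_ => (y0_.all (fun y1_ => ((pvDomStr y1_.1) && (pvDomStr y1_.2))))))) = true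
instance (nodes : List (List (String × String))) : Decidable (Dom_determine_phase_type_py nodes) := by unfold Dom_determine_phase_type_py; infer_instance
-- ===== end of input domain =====

-- B replaces A's three any(...) membership scans with one min-rank fold over a type->rank dict; alternative decomposition, same cost.

-- ===== PORT A =====
def determine_phase_type_py (nodes : List (List (String × String))) : String :=
  let node_types := nodes.map (fun node => (PySem.Dict.mk node).getD "type" "unknown")
  if node_types.any (fun nt => ["api_call", "webhook"].contains nt) then
    "external_integration"
  else if node_types.any (fun nt => ["data_processor", "transform"].contains nt) then
    "data_processing"
  else if node_types.any (fun nt => ["condition", "validation"].contains nt) then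
    "validation"
  else
    "general_processing"

-- ===== PORT B =====
def pvRankDict : PySem.Dict String Int :=
  PySem.Dict.mk [("api_call", 0), ("webhook", 0),
                 ("data_processor", 1), ("transform", 1),
                 ("condition", 2), ("validation", 2)]

def pvCategory : List String :=
  ["external_integration", "data_processing", "validation", "general_processing"]

def determine_phase_type_py_alt (nodes : List (List (String × String))) : String :=
  let best := nodes.foldl
    (fun best node => min best (pvRankDict.getD ((PySem.Dict.mk node).getD "type" "unknown") 3)) 3
  (PySem.List.pyGet? pvCategory best).getD ""   -- best ∈ [0,3] so the index is always in range

-- ===== PRECONDITION & SPEC =====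
def Spec_determine_phase_type_py (nodes : List (List (String × String))) (out : String) : Prop := out = determine_phase_type_py_alt nodes
instance (nodes : List (List (String × String))) (out : String) : Decidable (Spec_determine_phase_type_py nodes out) := by unfold Spec_determine_phase_type_py; infer_instance

-- ===== CLAIM (what is proved, stated in full; the proofs are below) =====
def Claim_equal_determine_phase_type_py : Prop := ∀ (nodes : List (List (String × String))), Dom_determine_phase_type_py nodes → Spec_determine_phase_type_py nodes (determine_phase_type_py nodes)

-- ===== LEMMAS AND PROOFS =====

-- rank of one type string, as B's dict lookup computes it
def pvRank (t : String) : Int := pvRankDict.getD t 3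

-- abstract min-rank of a list of type strings
def pvMinRank (ts : List String) : Int :=
  if ts.any (fun nt => ["api_call", "webhook"].contains nt) then 0
  else if ts.any (fun nt => ["data_processor", "transform"].contains nt) then 1
  else if ts.any (fun nt => ["condition", "validation"].contains nt) then 2
  else 3

theorem pvMinRank_nonneg (ts : List String) : 0 ≤ pvMinRank ts ∧ pvMinRank ts ≤ 3 := by
  unfold pvMinRank; split_ifs <;> omega

theorem pvRank_eq (t : String) :
    pvRank t = if t = "api_call" ∨ t = "webhook" then 0
      else if t = "data_processor" ∨ t = "transform" then 1
      else if t = "condition" ∨ t = "validation" then 2 else 3 := by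
  simp only [pvRank, pvRankDict, PySem.Dict.getD, PySem.Dict.get?]
  by_cases h1 : t = "api_call" <;> by_cases h2 : t = "webhook" <;>
    by_cases h3 : t = "data_processor" <;> by_cases h4 : t = "transform" <;>
    by_cases h5 : t = "condition" <;> by_cases h6 : t = "validation"
  all_goals try simp_all [List.find?, @eq_comm String]
  rw [beq_eq_false_iff_ne.mpr (Ne.symm h1), beq_eq_false_iff_ne.mpr (Ne.symm h2),
      beq_eq_false_iff_ne.mpr (Ne.symm h3), beq_eq_false_iff_ne.mpr (Ne.symm h4),
      beq_eq_false_iff_ne.mpr (Ne.symm h5), beq_eq_false_iff_ne.mpr (Ne.symm h6)]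
  rfl

theorem pvRank_bounds (t : String) : 0 ≤ pvRank t ∧ pvRank t ≤ 3 := by
  rw [pvRank_eq]; split_ifs <;> omega

theorem pvMinRank_cons (t : String) (ts : List String) :
    pvMinRank (t :: ts) = min (pvRank t) (pvMinRank ts) := by
  unfold pvMinRank
  rw [pvRank_eq]
  simp only [List.any_cons, List.contains_cons, List.contains_nil, Bool.or_false,
    Bool.or_eq_true, beq_iff_eq]
  by_cases h1 : t = "api_call" <;> by_cases h2 : t = "webhook" <;>
    by_cases h3 : t = "data_processor" <;> by_cases h4 : t = "transform" <;>
    by_cases h5 : t = "condition" <;> by_cases h6 : t = "validation" <;>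
    simp_all <;> split_ifs <;> omega

theorem pvFold_eq (ts : List String) (a : Int) (ha : 0 ≤ a ∧ a ≤ 3) :
    ts.foldl (fun best t => min best (pvRank t)) a = min a (pvMinRank ts) := by
  induction ts generalizing a with
  | nil => simp [pvMinRank]; omega
  | cons t ts ih =>
    have hr := pvRank_bounds t
    simp only [List.foldl_cons]
    rw [ih (min a (pvRank t)) (by omega), pvMinRank_cons]
    omega

theorem alt_eq (nodes : List (List (String × String))) :
    determine_phase_type_py_alt nodes =
      (PySem.List.pyGet? pvCategory
        (pvMinRank (nodes.map (fun node => (PySem.Dict.mk node).getD "type" "unknown")))).getD "" := by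
  unfold determine_phase_type_py_alt
  have : nodes.foldl
      (fun best node => min best (pvRankDict.getD ((PySem.Dict.mk node).getD "type" "unknown") 3)) 3
      = (nodes.map (fun node => (PySem.Dict.mk node).getD "type" "unknown")).foldl
          (fun best t => min best (pvRank t)) 3 := by
    simp only [List.foldl_map, pvRank]
  rw [this, pvFold_eq _ 3 (by omega)]
  have h := pvMinRank_nonneg (nodes.map (fun node => (PySem.Dict.mk node).getD "type" "unknown"))
  rw [min_eq_right h.2]

-- ===== VERDICT (by name: the statement is the Claim_ definition above) =====
theorem determine_phase_type_py_spec : Claim_equal_determine_phase_type_py := by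
  intro nodes _
  unfold Spec_determine_phase_type_py
  rw [alt_eq]
  unfold determine_phase_type_py pvMinRank
  dsimp only
  split_ifs <;> simp [pvCategory, PySem.List.pyGet?, PySem.List.pyIdx?]
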